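-- pv_equiv track=rewrite | github.com/ai-kmu/etc | algorithm/2022/0524_1487_Making File Names Unique/byunghyun.py | get_unique_name
-- ===== SOURCE A (Python) =====
-- def get_unique_name(names, entire_index):
--     # 넘버링은 0부터 시작한다.
--     numbering = 0
--     while True:
--         numbering += 1
--         new_name = names[entire_index] + '(' + str(numbering) + ')'
--         result = new_name in names[:entire_index]
--         if result is False:
--             break
--     return new_name
-- ===== SOURCE B (Python) =====
-- def get_unique_name(names, entire_index):
--     base = names[entire_index]
--     opener = base + '('
--     used = set()
--     for name in names[:entire_index]:
--         if name.startswith(opener) and name.endswith(')'):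
--             used.add(name[len(opener):-1])
--     numbering = 1
--     while str(numbering) in used:
--         numbering += 1
--     return opener + str(numbering) + ')'
-- ===== Notes on version B (the rewrite author's own statement) =====
-- stated objective: alternative
-- what changed: A re-tests each candidate name k=1,2,... by scanning the whole prefix per candidate; B makes a single pass over the prefix collecting the used '(n)'-suffix strings into a set, then returns the smallest positive numbering whose string is unused.
import Mathlib
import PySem

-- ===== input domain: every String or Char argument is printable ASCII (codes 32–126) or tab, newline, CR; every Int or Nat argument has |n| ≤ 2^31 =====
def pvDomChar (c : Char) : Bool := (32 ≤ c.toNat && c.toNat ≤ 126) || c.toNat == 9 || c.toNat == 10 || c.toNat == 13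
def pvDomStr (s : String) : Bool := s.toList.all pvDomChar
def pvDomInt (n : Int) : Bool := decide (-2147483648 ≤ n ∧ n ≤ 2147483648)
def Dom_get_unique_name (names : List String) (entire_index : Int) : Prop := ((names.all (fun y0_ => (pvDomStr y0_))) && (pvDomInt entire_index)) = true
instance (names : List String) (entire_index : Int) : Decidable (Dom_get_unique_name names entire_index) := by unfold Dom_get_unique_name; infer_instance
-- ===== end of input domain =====

-- B replaces A's generate-and-test loop (re-scanning the prefix for every candidate number)
-- by one pass collecting the used "(…)"-suffix strings of the prefix into a set, then the
-- smallest positive numbering whose string is not used; same return value on Pre_.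

-- ===== PORT A =====
-- A's 'while True' loop; the fuel pre.length + 1 only makes the recursion total
-- (the candidate names are pairwise distinct, so the loop breaks within that many rounds)
def pvALoop (pre : List String) (base : String) : Nat → Int → String
  | 0, numbering => base ++ "(" ++ PySem.Int.toStr (numbering + 1) ++ ")"
  | fuel + 1, numbering =>
      let numbering := numbering + 1
      let new_name := base ++ "(" ++ PySem.Int.toStr numbering ++ ")"
      if new_name ∈ pre then pvALoop pre base fuel numbering else new_name

def get_unique_name (names : List String) (entire_index : Int) : String :=
  let pre := PySem.List.slice names none (some entire_index)
  pvALoop pre (PySem.List.pyGetD names entire_index "") (pre.length + 1) 0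

-- ===== PORT B =====
def pvUsed (opener : String) (pre : List String) : PySem.Set String :=
  pre.foldl (fun used name =>
      if PySem.Str.startswith name opener && PySem.Str.endswith name ")" then
        PySem.Set.add used (PySem.Str.slice name (some (PySem.Str.len opener)) (some (-1)))
      else used)
    PySem.Set.empty

-- B's 'while numbering in used' loop; the fuel pre.length + 1 only makes it total
def pvBLoop (used : PySem.Set String) : Nat → Int → Int
  | 0, numbering => numbering
  | fuel + 1, numbering =>
      if PySem.Int.toStr numbering ∈ used then pvBLoop used fuel (numbering + 1)
      else numbering

def get_unique_name_alt (names : List String) (entire_index : Int) : String :=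
  let base := PySem.List.pyGetD names entire_index ""
  let opener := base ++ "("
  let pre := PySem.List.slice names none (some entire_index)
  let used := pvUsed opener pre
  opener ++ PySem.Int.toStr (pvBLoop used (pre.length + 1) 1) ++ ")"

-- ===== PRECONDITION & SPEC =====
-- A (and B) raise IndexError on names[entire_index] when the index is out of range
def Pre_get_unique_name (names : List String) (entire_index : Int) : Prop :=
  PySem.Raise.InRange names.length entire_index
instance (names : List String) (entire_index : Int) : Decidable (Pre_get_unique_name names entire_index) := by unfold Pre_get_unique_name; infer_instance

def pvWitness_get_unique_name : List String × Int := (["pic", "pic(1)"], -1)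

def Spec_get_unique_name (names : List String) (entire_index : Int) (out : String) : Prop := out = get_unique_name_alt names entire_index
instance (names : List String) (entire_index : Int) (out : String) : Decidable (Spec_get_unique_name names entire_index out) := by unfold Spec_get_unique_name; infer_instance

-- ===== CLAIM (what is proved, stated in full; the proofs are below) =====
def Claim_equal_get_unique_name : Prop := ∀ (names : List String) (entire_index : Int), Dom_get_unique_name names entire_index → Pre_get_unique_name names entire_index → Spec_get_unique_name names entire_index (get_unique_name names entire_index)

-- ===== LEMMAS AND PROOFS =====

-- membership in the set built by B's collection pass
theorem pv_mem_used (opener : String) (pre : List String) (t : String) :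
    t ∈ pvUsed opener pre ↔ ∃ name ∈ pre,
      (PySem.Str.startswith name opener && PySem.Str.endswith name ")") = true ∧
      PySem.Str.slice name (some (PySem.Str.len opener)) (some (-1)) = t := by
  have aux : ∀ (l : List String) (s : PySem.Set String),
      t ∈ l.foldl (fun used name =>
        if PySem.Str.startswith name opener && PySem.Str.endswith name ")" then
          PySem.Set.add used (PySem.Str.slice name (some (PySem.Str.len opener)) (some (-1)))
        else used) s ↔
      t ∈ s ∨ ∃ name ∈ l,
        (PySem.Str.startswith name opener && PySem.Str.endswith name ")") = true ∧
        PySem.Str.slice name (some (PySem.Str.len opener)) (some (-1)) = t := by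
    intro l
    induction l with
    | nil => simp
    | cons x l ih =>
      intro s
      simp only [List.foldl_cons, ih]
      by_cases hx : (PySem.Str.startswith x opener && PySem.Str.endswith x ")") = true
      · simp only [hx, if_pos]
        rw [PySem.Set.mem_add]
        constructor
        · rintro (⟨h | h⟩ | h)
          · exact Or.inl h
          · exact Or.inr ⟨x, List.mem_cons_self .., hx, h.symm⟩
          · obtain ⟨name, hn, hc, hm⟩ := h
            exact Or.inr ⟨name, by simp [hn], hc, hm⟩
        · rintro (h | ⟨name, hn, hc, hm⟩)
          · exact Or.inl (Or.inl h)
          · rcases List.mem_cons.mp hn with rfl | hn'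
            · exact Or.inl (Or.inr hm.symm)
            · exact Or.inr ⟨name, hn', hc, hm⟩
      · simp only [hx, if_neg, Bool.false_eq_true, not_false_iff]
        constructor
        · rintro (h | ⟨name, hn, hc, hm⟩)
          · exact Or.inl h
          · exact Or.inr ⟨name, List.mem_cons_of_mem _ hn, hc, hm⟩
        · rintro (h | ⟨name, hn, hc, hm⟩)
          · exact Or.inl h
          · rcases List.mem_cons.mp hn with rfl | hn'
            · exact absurd hc hx
            · exact Or.inr ⟨name, hn', hc, hm⟩
  rw [pvUsed, aux]
  simp [PySem.Set.empty]

-- what B's slice extracts from a name of the shape base ++ "(" ++ t ++ ")"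
theorem pv_slice_mid (base t name : String)
    (h : name.toList = base.toList ++ '(' :: (t.toList ++ [')'])) :
    PySem.Str.slice name (some (PySem.Str.len (base ++ "("))) (some (-1)) = t := by
  have hlenop : PySem.Str.len (base ++ "(") = ((base.toList.length + 1 : Nat) : Int) := by
    simp [PySem.Str.len, String.toList_append]
  have hlist : name.toList = (base.toList ++ ['(']) ++ (t.toList ++ [')']) := by
    simpa using h
  rw [PySem.Str.slice, hlenop]
  have hn : name.toList.length = (base.toList.length + 1) + (t.toList.length + 1) := by
    rw [hlist]; simp; omega
  rw [show PySem.Chars.slice name.toList (some ((base.toList.length + 1 : Nat) : Int)) (some (-1))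
        = t.toList from ?_]
  · exact String.ofList_toList
  · rw [PySem.Chars.slice_eq_listSlice, PySem.List.slice]
    simp only [PySem.List.clampIdx_natCast, PySem.List.clampIdx_neg_one, hn]
    rw [hlist]
    rw [show min (base.toList.length + 1) ((base.toList.length + 1) + (t.toList.length + 1))
          = base.toList.length + 1 by omega]
    rw [show (base.toList.length + 1) + (t.toList.length + 1) - 1 - (base.toList.length + 1)
          = t.toList.length by omega]
    rw [show base.toList.length + 1 = (base.toList ++ ['(']).length by simp]
    rw [List.drop_left, List.take_left']
    simp

-- a name passing B's startswith/endswith test has exactly that shape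
theorem pv_recon (base name : String)
    (h : (PySem.Str.startswith name (base ++ "(") && PySem.Str.endswith name ")") = true) :
    ∃ t : String, name.toList = base.toList ++ '(' :: (t.toList ++ [')']) := by
  have h1 : (base ++ "(").toList <+: name.toList := by
    have := (Bool.and_eq_true _ _).mp h |>.1
    rw [PySem.Str.startswith] at this
    exact (PySem.Chars.startswith_iff _ _).mp this
  have h2 : (")" : String).toList <:+ name.toList := by
    have := (Bool.and_eq_true _ _).mp h |>.2
    rw [PySem.Str.endswith] at this
    exact (PySem.Chars.endswith_iff _ _).mp this
  have h1' : base.toList ++ ['('] <+: name.toList := by simpa [String.toList_append] using h1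
  have h2' : [')'] <:+ name.toList := by simpa using h2
  obtain ⟨r, hr⟩ := h1'
  obtain ⟨q, hq⟩ := h2'
  rcases List.eq_nil_or_concat r with rfl | ⟨m, a, rfl⟩
  · -- name = base ++ "(" : its last char is '(', contradicting endswith ")"
    exfalso
    rw [← hr, List.append_nil] at hq
    have := (List.append_inj' hq (by simp)).2
    simp at this
  · -- name = base ++ "(" ++ m ++ [a]; the suffix [')'] forces a = ')'
    have hshape : name.toList = (base.toList ++ '(' :: m) ++ [a] := by
      rw [← hr]; simp
    have ha : a = ')' := by
      rw [hshape] at hq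
      have := (List.append_inj' hq (by simp)).2
      simpa using this.symm
    exact ⟨String.ofList m, by rw [hshape, ha]; simp⟩

-- the candidate string A tests is in the prefix iff its number string is in B's set
theorem pv_cand_mem (base : String) (pre : List String) (k : Int) :
    (base ++ "(" ++ PySem.Int.toStr k ++ ")") ∈ pre ↔
    PySem.Int.toStr k ∈ pvUsed (base ++ "(") pre := by
  have hcand : (base ++ "(" ++ PySem.Int.toStr k ++ ")").toList
      = base.toList ++ '(' :: ((PySem.Int.toStr k).toList ++ [')']) := by
    simp [String.toList_append]
  constructor
  · intro hmem
    rw [pv_mem_used]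
    refine ⟨_, hmem, ?_, pv_slice_mid base (PySem.Int.toStr k) _ hcand⟩
    rw [Bool.and_eq_true, PySem.Str.startswith, PySem.Str.endswith]
    constructor
    · rw [PySem.Chars.startswith_iff, hcand]
      exact ⟨(PySem.Int.toStr k).toList ++ [')'], by simp [String.toList_append]⟩
    · rw [PySem.Chars.endswith_iff, hcand]
      exact ⟨base.toList ++ '(' :: (PySem.Int.toStr k).toList, by simp⟩
  · intro hmem
    rw [pv_mem_used] at hmem
    obtain ⟨name, hn, hc, hm⟩ := hmem
    obtain ⟨t, ht⟩ := pv_recon base name hc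
    have hmid := pv_slice_mid base t name ht
    rw [hmid] at hm
    have : name = base ++ "(" ++ PySem.Int.toStr k ++ ")" := by
      apply String.toList_inj.mp
      rw [ht, hcand, hm]
    rwa [this] at hn

-- step-by-step alignment of the two loops (A at numbering n ≙ B at numbering n+1)
theorem pv_loop_eq (pre : List String) (base : String) (fuel : Nat) (n : Int) :
    pvALoop pre base fuel n
      = base ++ "(" ++ PySem.Int.toStr (pvBLoop (pvUsed (base ++ "(") pre) fuel (n + 1)) ++ ")" := by
  induction fuel generalizing n with
  | zero => rfl
  | succ fuel ih =>
    rw [pvALoop, pvBLoop]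
    by_cases hmem : (base ++ "(" ++ PySem.Int.toStr (n + 1) ++ ")") ∈ pre
    · rw [if_pos hmem, if_pos ((pv_cand_mem base pre (n + 1)).mp hmem), ih]
    · rw [if_neg hmem, if_neg (fun hu => hmem ((pv_cand_mem base pre (n + 1)).mpr hu))]

-- ===== VERDICT (by name: the statement is the Claim_ definition above) =====
theorem get_unique_name_spec : Claim_equal_get_unique_name := by
  intro names entire_index _ _
  show get_unique_name names entire_index = get_unique_name_alt names entire_index
  rw [get_unique_name, get_unique_name_alt]
  rw [pv_loop_eq]
  simp [String.append_assoc]
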